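-- pv_equiv track=rewrite | github.com/callum-b/H2G2 | datapreprocessing.py | hap_count
-- ===== SOURCE A (Python) =====
-- def hap_count(mycells:list) -> int:
--     """
--       hap_count: count the number of occurrences of a mutation in a line of a diploid vcf
--       used in splitvcf
--     """
--     n=0
--     for cell in mycells :
--         if cell == "0|1" or cell == "1|0" :
--             n+=1
--         elif cell == "1|1" :
--             n+=2
--     return n
-- ===== SOURCE B (Python) =====
-- def hap_count(mycells: list) -> int:
--     return mycells.count("0|1") + mycells.count("1|0") + 2 * mycells.count("1|1")
-- ===== Notes on version B (the rewrite author's own statement) =====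
-- stated objective: simpler
-- what changed: Replaced the explicit if/elif accumulation loop with three list.count scans combined arithmetically (1*het counts + 2*homozygous).
import Mathlib
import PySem

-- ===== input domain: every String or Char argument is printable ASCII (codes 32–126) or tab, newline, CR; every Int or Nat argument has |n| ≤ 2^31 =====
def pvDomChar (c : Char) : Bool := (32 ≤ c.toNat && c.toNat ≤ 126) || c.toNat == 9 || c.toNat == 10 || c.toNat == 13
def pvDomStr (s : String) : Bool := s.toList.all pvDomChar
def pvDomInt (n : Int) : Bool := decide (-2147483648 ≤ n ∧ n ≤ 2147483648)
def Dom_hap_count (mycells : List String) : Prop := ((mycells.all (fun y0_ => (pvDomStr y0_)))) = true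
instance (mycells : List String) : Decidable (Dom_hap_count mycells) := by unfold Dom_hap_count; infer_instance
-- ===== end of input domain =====

-- ===== PORT A =====
-- One pass with if/elif branches, as in A.
def hap_count (mycells : List String) : Int :=
  mycells.foldl (fun n cell =>
    if cell == "0|1" || cell == "1|0" then n + 1
    else if cell == "1|1" then n + 2
    else n) 0

-- ===== PORT B =====
-- B: three count scans combined arithmetically.
def hap_count_alt (mycells : List String) : Int :=
  (PySem.List.count mycells "0|1" : Int) + (PySem.List.count mycells "1|0" : Int)
    + 2 * (PySem.List.count mycells "1|1" : Int)

-- ===== PRECONDITION & SPEC =====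
def Spec_hap_count (mycells : List String) (out : Int) : Prop := out = hap_count_alt mycells
instance (mycells : List String) (out : Int) : Decidable (Spec_hap_count mycells out) := by unfold Spec_hap_count; infer_instance

-- ===== CLAIM (what is proved, stated in full; the proofs are below) =====
def Claim_equal_hap_count : Prop := ∀ (mycells : List String), Dom_hap_count mycells → Spec_hap_count mycells (hap_count mycells)

-- ===== LEMMAS AND PROOFS =====

-- ===== VERDICT (by name: the statement is the Claim_ definition above) =====
theorem hap_count_fold (mycells : List String) (n : Int) :
    mycells.foldl (fun n cell =>
      if cell == "0|1" || cell == "1|0" then n + 1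
      else if cell == "1|1" then n + 2
      else n) n
    = n + (PySem.List.count mycells "0|1" : Int) + (PySem.List.count mycells "1|0" : Int)
        + 2 * (PySem.List.count mycells "1|1" : Int) := by
  induction mycells generalizing n with
  | nil => simp [PySem.List.count]
  | cons c cs ih =>
      simp only [List.foldl_cons, ih, PySem.List.count, List.count_cons]
      by_cases h1 : c = "0|1" <;> by_cases h2 : c = "1|0" <;> by_cases h3 : c = "1|1" <;>
        simp_all <;> ring

theorem hap_count_spec : Claim_equal_hap_count := by
  intro mycells _
  unfold Spec_hap_count hap_count hap_count_alt
  have := hap_count_fold mycells 0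
  simpa using this
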